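-- pv_equiv track=rewrite | github.com/Dadudekc/AutoDream.Os | src/services/ssot/config_sync.py | _fix_coordinate_inconsistencies
-- ===== SOURCE A (Python) =====
-- from typing import Dict, Any, List
--
-- def _fix_coordinate_inconsistencies(coord_config: Dict[str, Any]) -> List[str]:
--     """Fix coordinate inconsistencies."""
--     fixes = []
--
--     # Standard coordinates for known agents
--     standard_coords = {
--         "Agent-7": [700, 938]  # Correct coordinates
--     }
--
--     for agent_id, coords in coord_config.items():
--         if agent_id in standard_coords:
--             expected_coords = standard_coords[agent_id]
--             if coords.get("chat_input_coordinates") != expected_coords: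
--                 coords["chat_input_coordinates"] = expected_coords
--                 fixes.append(f"Fixed {agent_id} coordinates to {expected_coords}")
--
--     return fixes
-- ===== SOURCE B (Python) =====
-- from typing import Dict, Any, List
--
-- def _fix_coordinate_inconsistencies(coord_config: Dict[str, Any]) -> List[str]:
--     """Fix coordinate inconsistencies (B: direct lookup of the single known agent, no loop)."""
--     expected = [700, 938]
--     coords = coord_config.get("Agent-7")
--     if coords is None or coords.get("chat_input_coordinates") == expected:
--         return []
--     coords["chat_input_coordinates"] = expected
--     return [f"Fixed Agent-7 coordinates to {expected}"]
-- ===== Notes on version B (the rewrite author's own statement) =====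
-- stated objective: simpler
-- what changed: B replaces A's loop over all config entries with a single direct dict lookup of the only known agent (Agent-7) and an early return, eliminating the loop and the standard_coords table entirely; Pre_ excludes only duplicate-outer-key association lists, which represent no Python dict.
import Mathlib
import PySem

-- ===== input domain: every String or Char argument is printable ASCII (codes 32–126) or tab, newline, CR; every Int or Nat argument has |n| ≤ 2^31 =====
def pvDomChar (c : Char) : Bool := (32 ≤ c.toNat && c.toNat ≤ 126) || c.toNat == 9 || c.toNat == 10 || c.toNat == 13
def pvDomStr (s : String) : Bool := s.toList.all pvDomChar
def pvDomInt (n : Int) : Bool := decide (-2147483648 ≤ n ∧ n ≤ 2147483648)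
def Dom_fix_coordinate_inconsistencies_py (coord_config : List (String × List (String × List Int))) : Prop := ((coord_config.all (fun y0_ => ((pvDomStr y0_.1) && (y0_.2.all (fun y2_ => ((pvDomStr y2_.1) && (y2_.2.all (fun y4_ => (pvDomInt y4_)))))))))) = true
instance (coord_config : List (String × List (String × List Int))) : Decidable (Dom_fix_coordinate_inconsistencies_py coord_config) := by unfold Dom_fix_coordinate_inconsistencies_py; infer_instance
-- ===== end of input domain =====

-- B replaces A's loop over all config entries by one direct lookup of the single known agent;
-- both Pythons mutate the inner coords dict in place: the equivalence proved is about the RETURN value only.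

-- ===== PORT A =====
-- str([700, 938]) for the f-string:
def pvStrIntList (xs : List Int) : String :=
  "[" ++ PySem.Str.join ", " (xs.map PySem.Int.toStr) ++ "]"

def pvStandardCoords : PySem.Dict String (List Int) := PySem.Dict.mk [("Agent-7", [700, 938])]

def fix_coordinate_inconsistencies_py (coord_config : List (String × List (String × List Int))) : List String :=
  coord_config.foldl (fun fixes kv =>
    match pvStandardCoords.get? kv.1 with
    | none => fixes
    | some expected_coords =>
      if (PySem.Dict.mk kv.2).get? "chat_input_coordinates" ≠ some expected_coords then
        fixes ++ ["Fixed " ++ kv.1 ++ " coordinates to " ++ pvStrIntList expected_coords]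
      else fixes) []

-- ===== PORT B =====
-- Source B: no loop — one .get of "Agent-7", an early return, and a literal message.
def fix_coordinate_inconsistencies_py_alt (coord_config : List (String × List (String × List Int))) : List String :=
  match (PySem.Dict.mk coord_config).get? "Agent-7" with
  | none => []
  | some coords =>
    if (PySem.Dict.mk coords).get? "chat_input_coordinates" = some [700, 938] then []
    else ["Fixed Agent-7 coordinates to " ++ pvStrIntList [700, 938]]

-- ===== PRECONDITION & SPEC =====
-- Pre_ excludes association lists with a duplicate outer key: such lists represent no Python dict
-- (dict construction collapses duplicate keys), so they are artefacts of the List encoding; on them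
-- A's fold would visit every duplicate while B's first-match lookup sees only the first.
def Pre_fix_coordinate_inconsistencies_py (coord_config : List (String × List (String × List Int))) : Prop :=
  (coord_config.map Prod.fst).Nodup
instance (coord_config : List (String × List (String × List Int))) : Decidable (Pre_fix_coordinate_inconsistencies_py coord_config) := by unfold Pre_fix_coordinate_inconsistencies_py; infer_instance

def pvWitness_fix_coordinate_inconsistencies_py : (List (String × List (String × List Int))) :=
  [("Agent-7", [("chat_input_coordinates", [1, 2])]), ("Agent-3", [])]

def Spec_fix_coordinate_inconsistencies_py (coord_config : List (String × List (String × List Int))) (out : List String) : Prop := out = fix_coordinate_inconsistencies_py_alt coord_config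
instance (coord_config : List (String × List (String × List Int))) (out : List String) : Decidable (Spec_fix_coordinate_inconsistencies_py coord_config out) := by unfold Spec_fix_coordinate_inconsistencies_py; infer_instance

-- ===== CLAIM (what is proved, stated in full; the proofs are below) =====
def Claim_equal_fix_coordinate_inconsistencies_py : Prop := ∀ (coord_config : List (String × List (String × List Int))), Dom_fix_coordinate_inconsistencies_py coord_config → Pre_fix_coordinate_inconsistencies_py coord_config → Spec_fix_coordinate_inconsistencies_py coord_config (fix_coordinate_inconsistencies_py coord_config)

-- ===== LEMMAS AND PROOFS =====
-- The body of A's loop, as a per-entry contribution.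
def pvGA (kv : String × List (String × List Int)) : List String :=
  match pvStandardCoords.get? kv.1 with
  | none => []
  | some expected_coords =>
    if (PySem.Dict.mk kv.2).get? "chat_input_coordinates" ≠ some expected_coords then
      ["Fixed " ++ kv.1 ++ " coordinates to " ++ pvStrIntList expected_coords]
    else []

theorem pvA_eq_flatMap (coord_config : List (String × List (String × List Int))) :
    fix_coordinate_inconsistencies_py coord_config = coord_config.flatMap pvGA := by
  unfold fix_coordinate_inconsistencies_py
  have h : (fun (fixes : List String) (kv : String × List (String × List Int)) =>
      match pvStandardCoords.get? kv.1 with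
      | none => fixes
      | some expected_coords =>
        if (PySem.Dict.mk kv.2).get? "chat_input_coordinates" ≠ some expected_coords then
          fixes ++ ["Fixed " ++ kv.1 ++ " coordinates to " ++ pvStrIntList expected_coords]
        else fixes)
      = (fun fixes kv => fixes ++ pvGA kv) := by
    funext fixes kv
    unfold pvGA
    rcases hstd : pvStandardCoords.get? kv.1 with _ | e
    · simp
    · by_cases hc : (PySem.Dict.mk kv.2).get? "chat_input_coordinates" = some e <;> simp [hc]
  rw [h, PySem.List.foldl_append_eq_flatMap]
  simp

theorem pvGA_of_ne (kv : String × List (String × List Int)) (h : kv.1 ≠ "Agent-7") :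
    pvGA kv = [] := by
  unfold pvGA pvStandardCoords
  rw [PySem.Dict.get?_mk_cons]
  simp [beq_iff_eq, Ne.symm h, PySem.Dict.get?]

theorem pvFlatMap_nil (l : List (String × List (String × List Int)))
    (h : "Agent-7" ∉ l.map Prod.fst) : l.flatMap pvGA = [] := by
  induction l with
  | nil => rfl
  | cons kv rest ih =>
    simp only [List.map_cons, List.mem_cons, not_or] at h
    simp [List.flatMap_cons, pvGA_of_ne kv (fun he => h.1 he.symm), ih h.2]

theorem pvMain (coord_config : List (String × List (String × List Int)))
    (hnd : (coord_config.map Prod.fst).Nodup) :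
    fix_coordinate_inconsistencies_py coord_config
      = fix_coordinate_inconsistencies_py_alt coord_config := by
  rw [pvA_eq_flatMap]
  induction coord_config with
  | nil => rfl
  | cons kv rest ih =>
    obtain ⟨k, v⟩ := kv
    simp only [List.map_cons, List.nodup_cons] at hnd
    by_cases h7 : k = "Agent-7"
    · subst h7
      rw [List.flatMap_cons, pvFlatMap_nil rest hnd.1, List.append_nil]
      show pvGA ("Agent-7", v) = fix_coordinate_inconsistencies_py_alt (("Agent-7", v) :: rest)
      unfold pvGA fix_coordinate_inconsistencies_py_alt pvStandardCoords
      rw [PySem.Dict.get?_mk_cons, PySem.Dict.get?_mk_cons]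
      by_cases hc : (PySem.Dict.mk v).get? "chat_input_coordinates" = some [700, 938] <;> simp [hc]
    · rw [List.flatMap_cons, pvGA_of_ne (k, v) h7, List.nil_append, ih hnd.2]
      show fix_coordinate_inconsistencies_py_alt rest
        = fix_coordinate_inconsistencies_py_alt ((k, v) :: rest)
      unfold fix_coordinate_inconsistencies_py_alt
      rw [PySem.Dict.get?_mk_cons]
      have hb : (k == "Agent-7") = false := by simp [h7]
      simp [hb]

-- ===== VERDICT (by name: the statement is the Claim_ definition above) =====
theorem fix_coordinate_inconsistencies_py_spec : Claim_equal_fix_coordinate_inconsistencies_py := by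
  intro coord_config _ hpre
  unfold Spec_fix_coordinate_inconsistencies_py
  exact pvMain coord_config hpre
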